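-- pv_equiv track=rewrite | github.com/Maple30/Python_Mutationtest_Project | mutation_tool/functions.py | opration_symbols_check
-- ===== SOURCE A (Python) =====
-- def get_index(string=None, item=''):
--     flag = 0
--     all_index = []
--
--     for value in string:
--         if string.find(item,flag) != -1:
--            all_index.append(string.find(item,flag))
--            flag =  string.find(item,flag) + 1
--         else:
--             break
--     return all_index
--
-- def opration_symbols_check(origin=""):
--     opration_symbols = ("+","-","*","/","%") #運算符號
--     op_rs_symbols = list(opration_symbols)
--     mutations = []
--     for i,symbol in enumerate(opration_symbols): #檢查運算符號
--         if symbol in origin: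
--             all_willberp_index = get_index(origin, symbol) #獲取相符的所有索引
--             del op_rs_symbols[i] #把不必變異的符號刪除
--             for index in all_willberp_index:
--                 for rpsym in op_rs_symbols:
--                     mutations.append(origin[:index] + rpsym + origin[(index+1):])
--             op_rs_symbols = list(opration_symbols)
--     return mutations
-- ===== SOURCE B (Python) =====
-- def opration_symbols_check(origin=""):
--     opration_symbols = ("+", "-", "*", "/", "%")
--     positions = {op: [] for op in opration_symbols}
--     for i, ch in enumerate(origin):
--         if ch in positions:
--             positions[ch].append(i)
--     mutations = []
--     for symbol in opration_symbols:
--         for index in positions[symbol]: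
--             for rpsym in opration_symbols:
--                 if rpsym != symbol:
--                     mutations.append(origin[:index] + rpsym + origin[index + 1:])
--     return mutations
-- ===== Notes on version B (the rewrite author's own statement) =====
-- stated objective: alternative
-- what changed: Replaces the per-symbol repeated str.find scans (get_index helper) and the del-and-rebuild of the replacement list with a single enumerate pass that groups operator positions by character in a dict, then emits mutations by iterating the operator tuple over the table and skipping the symbol itself.
import Mathlib
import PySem

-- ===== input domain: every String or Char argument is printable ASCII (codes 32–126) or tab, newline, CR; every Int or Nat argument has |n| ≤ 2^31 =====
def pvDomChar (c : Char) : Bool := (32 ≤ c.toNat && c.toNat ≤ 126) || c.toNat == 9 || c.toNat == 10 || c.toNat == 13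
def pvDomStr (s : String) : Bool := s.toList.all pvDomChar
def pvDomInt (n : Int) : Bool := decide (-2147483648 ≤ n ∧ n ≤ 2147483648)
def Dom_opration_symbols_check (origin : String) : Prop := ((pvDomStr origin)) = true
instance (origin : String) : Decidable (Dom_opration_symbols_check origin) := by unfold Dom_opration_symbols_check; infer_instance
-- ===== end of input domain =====

-- B replaces A's per-symbol repeated str.find scans (get_index) and del-and-rebuild of the
-- replacement list with one enumerate pass grouping operator positions in a dict (alternative decomposition).

-- ===== PORT A =====
-- get_index: 'for value in string' drives the loop (fuel = the chars), flag is the search start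
def pvGetIndexGo (s item : List Char) : List Char → Int → List Int → List Int
  | [], _, acc => acc
  | _ :: rest, flag, acc =>
    if PySem.Chars.findFrom s item flag none ≠ -1 then
      pvGetIndexGo s item rest (PySem.Chars.findFrom s item flag none + 1)
        (acc ++ [PySem.Chars.findFrom s item flag none])
    else acc

def pvGetIndex (string item : List Char) : List Int :=
  pvGetIndexGo string item string 0 []

-- origin[:index] + rpsym + origin[index+1:]
def pvMut (ol : List Char) (index : Int) (rpsym : List Char) : String :=
  String.ofList (PySem.List.slice ol none (some index) ++ rpsym ++ PySem.List.slice ol (some (index + 1)) none)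

def opration_symbols_check (origin : String) : List String :=
  let ol := origin.toList
  let oprationSymbols : List (List Char) := [['+'], ['-'], ['*'], ['/'], ['%']]
  (PySem.List.enumerate oprationSymbols).foldl (fun mutations p =>
    if PySem.Chars.isIn p.2 ol then
      let allWillberpIndex := pvGetIndex ol p.2
      let opRsSymbols := oprationSymbols.eraseIdx p.1.toNat  -- del op_rs_symbols[i]
      allWillberpIndex.foldl (fun m index =>
        opRsSymbols.foldl (fun m rpsym => m ++ [pvMut ol index rpsym]) m) mutations
    else mutations) []

-- ===== PORT B =====
def opration_symbols_check_alt (origin : String) : List String :=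
  let ol := origin.toList
  let ops : List (List Char) := [['+'], ['-'], ['*'], ['/'], ['%']]
  let d0 : PySem.Dict (List Char) (List Int) := ops.foldl (fun d op => d.insert op []) PySem.Dict.empty
  let positions := (PySem.List.enumerate ol).foldl (fun d p =>
    if d.contains [p.2] then d.modify [p.2] [] (· ++ [p.1]) else d) d0
  ops.foldl (fun mutations symbol =>
    (positions.getD symbol []).foldl (fun m index =>
      ops.foldl (fun m rpsym =>
        if rpsym ≠ symbol then m ++ [pvMut ol index rpsym] else m) m) mutations) []

-- ===== PRECONDITION & SPEC =====
def Spec_opration_symbols_check (origin : String) (out : List String) : Prop := out = opration_symbols_check_alt origin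
instance (origin : String) (out : List String) : Decidable (Spec_opration_symbols_check origin out) := by unfold Spec_opration_symbols_check; infer_instance

-- ===== CLAIM (what is proved, stated in full; the proofs are below) =====
def Claim_equal_opration_symbols_check : Prop := ∀ (origin : String), Dom_opration_symbols_check origin → Spec_opration_symbols_check origin (opration_symbols_check origin)


-- ===== LEMMAS AND PROOFS =====

-- ground truth: the ascending list of positions of c in l
def pvIdxList (c : Char) : List Char → List Nat
  | [] => []
  | x :: xs => if x = c then 0 :: (pvIdxList c xs).map (· + 1) else (pvIdxList c xs).map (· + 1)

lemma pvIdx_mem (c : Char) (l : List Char) (i : Nat) : i ∈ pvIdxList c l ↔ l[i]? = some c := by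
  induction l generalizing i with
  | nil => simp [pvIdxList]
  | cons x xs ih =>
    cases i with
    | zero => by_cases h : x = c <;> simp [pvIdxList, h, Ne.symm]
    | succ n => by_cases h : x = c <;> simp [pvIdxList, h, ih]

lemma pvIdx_nil_iff (c : Char) (l : List Char) : pvIdxList c l = [] ↔ c ∉ l := by
  induction l with
  | nil => simp [pvIdxList]
  | cons x xs ih =>
    by_cases h : x = c
    · simp [pvIdxList, h]
    · simp [pvIdxList, h, ih, Ne.symm h]

lemma pvIdx_pairwise (c : Char) (l : List Char) : (pvIdxList c l).Pairwise (· < ·) := by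
  induction l with
  | nil => simp [pvIdxList]
  | cons x xs ih =>
    by_cases h : x = c <;>
      simp [pvIdxList, h, List.pairwise_map] <;>
      exact ih.imp (by omega)

lemma pvIdx_length_le (c : Char) (l : List Char) : (pvIdxList c l).length ≤ l.length := by
  induction l with
  | nil => simp [pvIdxList]
  | cons x xs ih => by_cases h : x = c <;> simp [pvIdxList, h] <;> omega

lemma pvIdx_drop (c : Char) (l : List Char) (m : Nat) :
    (pvIdxList c (l.drop m)).map (m + ·) = (pvIdxList c l).filter (fun i => m ≤ i) := by
  induction l generalizing m with
  | nil => simp [pvIdxList]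
  | cons x xs ih =>
    cases m with
    | zero =>
      simp only [List.drop_zero]
      rw [List.filter_eq_self.2 (by intro a _; simp)]
      simp
    | succ n =>
      simp only [List.drop_succ_cons]
      by_cases h : x = c <;>
        simp [pvIdxList, h, List.filter_map, Function.comp_def, 
          ← ih n, List.map_map] <;>
      · exact fun a _ => by omega

lemma pvSingletonPrefix (c : Char) (l : List Char) (j : Nat) :
    [c] <+: l.drop j ↔ l[j]? = some c := by
  rw [← List.head?_drop]
  cases l.drop j with
  | nil => simp
  | cons x t => simp [List.cons_prefix_cons, eq_comm]

lemma pvFind_singleton (c : Char) (l : List Char) :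
    PySem.Chars.find l [c] = (match pvIdxList c l with | [] => -1 | i :: _ => (i : Int)) := by
  cases h : pvIdxList c l with
  | nil =>
    rw [PySem.Chars.find_eq_neg_one_iff]
    rw [List.singleton_infix_iff]
    exact (pvIdx_nil_iff c l).1 h
  | cons i0 rest =>
    have hmem : c ∈ l := by
      by_contra hc
      rw [(pvIdx_nil_iff c l).2 hc] at h; simp at h
    have hnn : 0 ≤ PySem.Chars.find l [c] := by
      rw [PySem.Chars.find_nonneg_iff, List.singleton_infix_iff]; exact hmem
    obtain ⟨hpre, hmin⟩ := PySem.Chars.find_spec hnn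
    rw [pvSingletonPrefix] at hpre
    have hi0 : l[i0]? = some c := (pvIdx_mem c l i0).1 (by rw [h]; exact List.mem_cons_self)
    have hj := (pvIdx_mem c l ((PySem.Chars.find l [c]).toNat)).2 hpre
    rw [h] at hj
    have heq : (PySem.Chars.find l [c]).toNat = i0 := by
      rcases List.mem_cons.1 hj with h1 | h1
      · exact h1
      · -- every member of rest exceeds i0 (pairwise), but minimality forbids i0 < toNat
        have hlt : i0 < (PySem.Chars.find l [c]).toNat := by
          have := pvIdx_pairwise c l
          rw [h] at this
          exact (List.pairwise_cons.1 this).1 _ h1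
        exact absurd ((pvSingletonPrefix c l i0).2 hi0) (hmin _ hlt)
    show PySem.Chars.find l [c] = (i0 : Int)
    omega

lemma pvFindFrom_singleton (c : Char) (l : List Char) (k : Nat) (hk : k ≤ l.length) :
    PySem.Chars.findFrom l [c] (k : Int) none =
      (match pvIdxList c (l.drop k) with | [] => -1 | i :: _ => ((k + i : Nat) : Int)) := by
  rw [PySem.Chars.findFrom_natCast l [c] k hk, pvFind_singleton]
  cases h : pvIdxList c (l.drop k) with
  | nil => simp
  | cons i0 rest => simp

lemma pvGetIndexGo_eq (c : Char) (l : List Char) (fuel : List Char) (k : Nat) (acc : List Int)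
    (hk : k ≤ l.length) (hf : (pvIdxList c (l.drop k)).length ≤ fuel.length) :
    pvGetIndexGo l [c] fuel (k : Int) acc =
      acc ++ (pvIdxList c (l.drop k)).map (fun i => ((k + i : Nat) : Int)) := by
  induction fuel generalizing k acc with
  | nil =>
    have : pvIdxList c (l.drop k) = [] := by
      cases h : pvIdxList c (l.drop k) <;> simp_all
    simp [pvGetIndexGo, this]
  | cons f fs ih =>
    cases h : pvIdxList c (l.drop k) with
    | nil =>
      rw [pvGetIndexGo]
      rw [show PySem.Chars.findFrom l [c] (↑k) none = -1 by
        rw [pvFindFrom_singleton c l k hk, h]]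
      simp
    | cons i0 rest =>
      have hff : PySem.Chars.findFrom l [c] (↑k) none = ((k + i0 : Nat) : Int) := by
        have hx := pvFindFrom_singleton c l k hk
        rw [h] at hx; exact hx
      -- i0 is a valid index of l.drop k
      have hi0 : (l.drop k)[i0]? = some c := (pvIdx_mem c _ i0).1 (by rw [h]; exact List.mem_cons_self)
      have hi0lt : i0 < l.length - k := by
        have := List.getElem?_eq_some_iff.1 hi0
        simpa [List.length_drop] using this.1
      have hk' : k + i0 + 1 ≤ l.length := by omega
      -- the remaining occurrences
      have hdrop : l.drop (k + i0 + 1) = (l.drop k).drop (i0 + 1) := by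
        rw [List.drop_drop]; ring_nf
      have hrest : (pvIdxList c (l.drop (k + i0 + 1))).map ((i0 + 1) + ·) = rest := by
        rw [hdrop, pvIdx_drop, h]
        rw [List.filter_cons_of_neg (by simp)]
        rw [List.filter_eq_self.2]
        intro a ha
        have hpw := pvIdx_pairwise c (l.drop k); rw [h] at hpw
        have := (List.pairwise_cons.1 hpw).1 a ha
        simp; omega
      have hlenrest : (pvIdxList c (l.drop (k + i0 + 1))).length = rest.length := by
        rw [← hrest]; simp
      rw [pvGetIndexGo]
      have hne : PySem.Chars.findFrom l [c] (↑k) none ≠ -1 := by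
        rw [hff]; omega
      rw [if_pos hne]
      rw [hff]
      have hcast : ((k + i0 : Nat) : Int) + 1 = ((k + i0 + 1 : Nat) : Int) := by push_cast; ring
      rw [hcast, ih (k + i0 + 1) _ hk' (by
        rw [hlenrest]
        have hlen := hf; rw [h] at hlen; simp at hlen; omega)]
      rw [List.append_assoc]
      congr 1
      rw [← hrest]
      simp only [List.map_cons, List.cons_append, List.map_map, Function.comp_def]
      congr 1
      apply List.map_congr_left; intro a _; congr 1; omega

lemma pvGetIndex_eq (c : Char) (l : List Char) :
    pvGetIndex l [c] = (pvIdxList c l).map (fun (i : Nat) => (i : Int)) := by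
  unfold pvGetIndex
  rw [show (0 : Int) = ((0 : Nat) : Int) by simp]
  rw [pvGetIndexGo_eq c l l 0 [] (by omega) (by simpa using pvIdx_length_le c l)]
  simp only [List.nil_append, List.drop_zero]
  apply List.map_congr_left; intro a _; simp

lemma pvEnumFilter (c : Char) (l : List Char) (s : Int) :
    ((PySem.List.enumerate l s).filter (fun p => p.2 == c)).map (fun p => p.1) =
      (pvIdxList c l).map (fun (i : Nat) => s + (i : Int)) := by
  induction l generalizing s with
  | nil => simp [PySem.List.enumerate, pvIdxList]
  | cons x xs ih =>
    rw [PySem.List.enumerate_cons]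
    by_cases h : x = c
    · simp only [pvIdxList, if_pos h, List.filter_cons]
      rw [if_pos (by simpa using h)]
      simp only [List.map_cons, List.map_map, Function.comp_def]
      rw [ih (s + 1)]
      refine List.cons_eq_cons.2 ⟨by simp, ?_⟩
      apply List.map_congr_left; intro a _; push_cast; ring
    · simp only [pvIdxList, if_neg h]
      rw [List.filter_cons_of_neg (by simpa using h)]
      rw [ih (s + 1), List.map_map, Function.comp_def]
      apply List.map_congr_left; intro a _; push_cast; ring

lemma pvFoldGuard (l : List (Int × Char)) (d : PySem.Dict (List Char) (List Int)) :
    l.foldl (fun d p => if d.contains [p.2] then d.modify [p.2] [] (· ++ [p.1]) else d) d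
      = (l.filter (fun p => d.contains [p.2])).foldl
          (fun d p => d.modify [p.2] [] (· ++ [p.1])) d := by
  induction l generalizing d with
  | nil => rfl
  | cons q qs ih =>
    simp only [List.foldl_cons, List.filter_cons]
    by_cases h : d.contains [q.2] = true
    · rw [if_pos h, if_pos (by simpa using h), List.foldl_cons, ih]
      congr 1
      apply List.filter_congr
      intro p _
      rw [PySem.Dict.contains_modify]
      by_cases hpq : p.2 = q.2
      · simp [hpq, h]
      · simp [hpq]
    · rw [if_neg h, if_neg (by simpa using h), ih]

lemma pvFoldPairs (l : List (Int × Char)) (d : PySem.Dict (List Char) (List Int)) :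
    l.foldl (fun d p => d.modify [p.2] [] (· ++ [p.1])) d
      = (l.map (fun p => ([p.2], p.1))).foldl (fun d q => d.modify q.1 [] (· ++ [q.2])) d := by
  induction l generalizing d with
  | nil => rfl
  | cons q qs ih => simp only [List.foldl_cons, List.map_cons, ih]

lemma pvPositions (c : Char) (l : List Char) (d : PySem.Dict (List Char) (List Int))
    (hc : d.contains [c] = true) (hget : d.getD [c] [] = []) :
    ((PySem.List.enumerate l 0).foldl
        (fun d p => if d.contains [p.2] then d.modify [p.2] [] (· ++ [p.1]) else d) d).getD [c] []
      = (pvIdxList c l).map (fun (i : Nat) => (i : Int)) := by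
  rw [pvFoldGuard]
  rw [pvFoldPairs, PySem.Dict.getD_foldl_modify_append]
  rw [hget, List.nil_append, List.filter_map, List.map_map]
  have hfilter : ((PySem.List.enumerate l 0).filter (fun p => d.contains [p.2])).filter
      ((fun q => q.1 == [c]) ∘ (fun (p : Int × Char) => ([p.2], p.1)))
      = (PySem.List.enumerate l 0).filter (fun p => p.2 == c) := by
    rw [List.filter_filter]
    apply List.filter_congr
    intro p _
    simp only [Function.comp_apply]
    by_cases hpc : p.2 = c
    · simp [hpc, hc]
    · simp [hpc]
  rw [hfilter]
  have := pvEnumFilter c l 0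
  simp only [Function.comp_def] at *
  rw [this]
  apply List.map_congr_left; intro a _; simp

def pvBlk (ol : List Char) (c : Char) (rs : List (List Char)) : List String :=
  (pvIdxList c ol).flatMap (fun (i : Nat) => rs.map (fun r => pvMut ol (i : Int) r))

lemma pvBlockA (ol : List Char) (c : Char) (rs : List (List Char)) (m : List String) :
    (if PySem.Chars.isIn [c] ol = true then
      (pvGetIndex ol [c]).foldl (fun m index =>
        rs.foldl (fun m rpsym => m ++ [pvMut ol index rpsym]) m) m
     else m) = m ++ pvBlk ol c rs := by
  by_cases h : PySem.Chars.isIn [c] ol = true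
  · rw [if_pos h, pvGetIndex_eq]
    simp only [PySem.List.foldl_append_singleton_eq_map]
    rw [List.foldl_map]
    rw [PySem.List.foldl_append_eq_flatMap]
    simp [pvBlk]
  · rw [if_neg h]
    have hc : c ∉ ol := by
      have := PySem.Chars.isIn_eq_false_iff [c] ol
      rw [List.singleton_infix_iff] at this
      exact this.1 (by simpa using h)
    rw [pvBlk, (pvIdx_nil_iff c ol).2 hc]
    simp

-- ===== VERDICT (by name: the statement is the Claim_ definition above) =====
theorem opration_symbols_check_spec : Claim_equal_opration_symbols_check := by
  intro origin _
  unfold Spec_opration_symbols_check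
  unfold opration_symbols_check opration_symbols_check_alt
  simp only [PySem.List.enumerate_cons, PySem.List.enumerate_nil, List.foldl_cons, List.foldl_nil]
  have hp := pvPositions '+' origin.toList (((((PySem.Dict.empty.insert ['+'] ([] : List Int)).insert ['-'] []).insert ['*'] []).insert ['/'] []).insert ['%'] []) (by decide) (by decide)
  have hm := pvPositions '-' origin.toList (((((PySem.Dict.empty.insert ['+'] ([] : List Int)).insert ['-'] []).insert ['*'] []).insert ['/'] []).insert ['%'] []) (by decide) (by decide)
  have ht := pvPositions '*' origin.toList (((((PySem.Dict.empty.insert ['+'] ([] : List Int)).insert ['-'] []).insert ['*'] []).insert ['/'] []).insert ['%'] []) (by decide) (by decide)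
  have hd := pvPositions '/' origin.toList (((((PySem.Dict.empty.insert ['+'] ([] : List Int)).insert ['-'] []).insert ['*'] []).insert ['/'] []).insert ['%'] []) (by decide) (by decide)
  have hr := pvPositions '%' origin.toList (((((PySem.Dict.empty.insert ['+'] ([] : List Int)).insert ['-'] []).insert ['*'] []).insert ['/'] []).insert ['%'] []) (by decide) (by decide)
  rw [hp, hm, ht, hd, hr]
  simp only [pvBlockA]
  simp [pvBlk, List.append_assoc, 
    Function.comp_def, List.flatMap_def]
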